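-- pv_equiv track=rewrite | github.com/JHyuna/AlgorithmStudyNowon | line/line1.py | solution
-- ===== SOURCE A (Python) =====
-- def solution(boxes):
--     result = []
--     boxes_num = len(boxes)
--     count = 0
--     for i in boxes:
--         for j in i:
--             if j in result:
--                 result.remove(j)
--                 count += 1
--             else:
--                 result.append(j)
--
--     answer = boxes_num - count
--
--     return answer
-- ===== SOURCE B (Python) =====
-- from collections import Counter
--
-- def solution(boxes):
--     c = Counter(j for box in boxes for j in box)
--     pairs = sum(v // 2 for v in c.values())
--     return len(boxes) - pairs
-- ===== Notes on version B (the rewrite author's own statement) =====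
-- stated objective: faster
-- what changed: Replaces A's incremental toggle-list matching (linear membership test plus remove/append per item) with a single Counter over all items followed by sum(v // 2) to count pairs.
import Mathlib
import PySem

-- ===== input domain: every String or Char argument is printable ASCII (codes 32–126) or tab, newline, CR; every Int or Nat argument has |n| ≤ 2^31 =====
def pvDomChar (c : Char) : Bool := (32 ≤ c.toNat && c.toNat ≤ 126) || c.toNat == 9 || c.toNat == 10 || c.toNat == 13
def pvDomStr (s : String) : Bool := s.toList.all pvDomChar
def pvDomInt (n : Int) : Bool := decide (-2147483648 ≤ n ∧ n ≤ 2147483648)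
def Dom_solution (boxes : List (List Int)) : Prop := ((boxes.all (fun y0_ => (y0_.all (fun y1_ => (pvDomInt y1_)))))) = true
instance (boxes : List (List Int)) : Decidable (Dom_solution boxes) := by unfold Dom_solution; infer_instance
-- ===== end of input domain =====

-- B replaces A's toggle-list pair matching by a Counter over all items plus sum(v // 2); simpler and avoids the inner membership scan.

-- ===== PORT A =====
-- one step of A's inner loop body (state = (result, count)); remove? is some when contains holds, the getD is a totality guard only
def solutionStep (st : List Int × Int) (j : Int) : List Int × Int :=
  if st.1.contains j then ((PySem.List.remove? st.1 j).getD st.1, st.2 + 1)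
  else (st.1 ++ [j], st.2)

def solution (boxes : List (List Int)) : Int :=
  let st := boxes.foldl (fun st i => i.foldl solutionStep st) (([] : List Int), (0 : Int))
  (boxes.length : Int) - st.2

-- ===== PORT B =====
def solution_alt (boxes : List (List Int)) : Int :=
  let c := PySem.Dict.counter (boxes.flatMap (fun box => box))
  let pairs := (c.values.map (fun v => PySem.Int.floordiv v 2)).sum
  (boxes.length : Int) - pairs

-- ===== PRECONDITION & SPEC =====
def Spec_solution (boxes : List (List Int)) (out : Int) : Prop := out = solution_alt boxes
instance (boxes : List (List Int)) (out : Int) : Decidable (Spec_solution boxes out) := by unfold Spec_solution; infer_instance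

-- ===== CLAIM (what is proved, stated in full; the proofs are below) =====
def Claim_equal_solution : Prop := ∀ (boxes : List (List Int)), Dom_solution boxes → Spec_solution boxes (solution boxes)

-- ===== LEMMAS AND PROOFS =====

-- number of pairs in a multiset: Σ over the support of count/2
def pairsOf (m : Multiset Int) : ℕ := ∑ x ∈ m.toFinset, m.count x / 2

theorem pairsOf_eq_sum_superset (m : Multiset Int) (s : Finset Int) (hs : m.toFinset ⊆ s) :
    pairsOf m = ∑ x ∈ s, m.count x / 2 := by
  unfold pairsOf
  refine Finset.sum_subset (f := fun x => m.count x / 2) hs ?_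
  intro x _ hx
  have : m.count x = 0 := by
    by_contra h
    exact hx (Multiset.mem_toFinset.mpr (Multiset.count_pos.mp (Nat.pos_of_ne_zero h)))
  simp [this]

theorem pairsOf_cons_of_even (j : Int) (m : Multiset Int) (h : m.count j % 2 = 0) :
    pairsOf (j ::ₘ m) = pairsOf m := by
  have hsub : (j ::ₘ m).toFinset ⊆ insert j m.toFinset := by
    intro x hx
    simp only [Multiset.toFinset_cons] at hx; exact hx
  have hsub2 : m.toFinset ⊆ insert j m.toFinset := Finset.subset_insert _ _
  rw [pairsOf_eq_sum_superset _ _ hsub, pairsOf_eq_sum_superset m _ hsub2]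
  have hj : j ∈ insert j m.toFinset := Finset.mem_insert_self _ _
  rw [← Finset.add_sum_erase _ _ hj, ← Finset.add_sum_erase _ (fun x => m.count x / 2) hj]
  have hcount : (j ::ₘ m).count j = m.count j + 1 := Multiset.count_cons_self _ _
  have : (j ::ₘ m).count j / 2 = m.count j / 2 := by rw [hcount]; omega
  rw [this]
  congr 1
  refine Finset.sum_congr rfl ?_
  intro x hx
  have hne : x ≠ j := (Finset.mem_erase.mp hx).1
  rw [Multiset.count_cons_of_ne hne]

theorem pairsOf_cons_cons (j : Int) (m : Multiset Int) :
    pairsOf (j ::ₘ j ::ₘ m) = pairsOf m + 1 := by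
  have hsub : (j ::ₘ j ::ₘ m).toFinset ⊆ insert j m.toFinset := by
    intro x hx
    simp only [Multiset.toFinset_cons] at hx
    simp only [Finset.mem_insert] at hx ⊢
    tauto
  have hsub2 : m.toFinset ⊆ insert j m.toFinset := Finset.subset_insert _ _
  rw [pairsOf_eq_sum_superset _ _ hsub, pairsOf_eq_sum_superset m _ hsub2]
  have hj : j ∈ insert j m.toFinset := Finset.mem_insert_self _ _
  rw [← Finset.add_sum_erase _ _ hj, ← Finset.add_sum_erase _ (fun x => m.count x / 2) hj]
  have hcount : (j ::ₘ j ::ₘ m).count j = m.count j + 2 := by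
    rw [Multiset.count_cons_self, Multiset.count_cons_self]
  have h1 : (j ::ₘ j ::ₘ m).count j / 2 = m.count j / 2 + 1 := by rw [hcount]; omega
  have h2 : ∀ x ∈ (insert j m.toFinset).erase j,
      (j ::ₘ j ::ₘ m).count x / 2 = m.count x / 2 := by
    intro x hx
    have hne : x ≠ j := (Finset.mem_erase.mp hx).1
    rw [Multiset.count_cons_of_ne hne, Multiset.count_cons_of_ne hne]
  rw [h1, Finset.sum_congr rfl h2]
  omega

-- the toggle loop's count advances by exactly the number of new pairs
theorem loop_count (l : List Int) : ∀ (res : List Int) (cnt : Int),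
    (∀ x, res.count x ≤ 1) →
    (l.foldl solutionStep (res, cnt)).2
      = cnt + (pairsOf (↑res + ↑l) : Int) - (pairsOf (↑res) : Int) := by
  induction l with
  | nil => intro res cnt _; simp
  | cons j t ih =>
    intro res cnt hres
    simp only [List.foldl_cons]
    by_cases hmem : j ∈ res
    · have hc1 : res.count j = 1 :=
        le_antisymm (hres j) (List.count_pos_iff.mpr hmem)
      have hstep : solutionStep (res, cnt) j = (res.erase j, cnt + 1) := by
        unfold solutionStep
        simp only [List.contains_eq_mem, hmem, decide_true, if_true]
        rw [PySem.List.remove?_eq_some_erase _ _ hmem]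
        rfl
      rw [hstep, ih (res.erase j) (cnt + 1)
        (fun x => le_trans ((List.erase_sublist).count_le x) (hres x))]
      have hres_ms : (↑res : Multiset Int) = j ::ₘ ↑(res.erase j) := by
        have := List.perm_cons_erase hmem
        exact Quot.sound this
      have herase_count : (↑(res.erase j) : Multiset Int).count j = 0 := by
        have : (res.erase j).count j = res.count j - 1 := List.count_erase_self
        simp only [Multiset.coe_count, this, hc1]
      have e1 : (↑res : Multiset Int) + ↑(j :: t) = j ::ₘ j ::ₘ (↑(res.erase j) + ↑t) := by
        rw [hres_ms, show ((j :: t : List Int) : Multiset Int) = j ::ₘ ↑t from rfl]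
        simp only [← Multiset.singleton_add]
        abel
      have e2 : pairsOf (↑res) = pairsOf (↑(res.erase j)) := by
        rw [hres_ms]
        exact pairsOf_cons_of_even _ _ (by rw [herase_count])
      rw [e1, pairsOf_cons_cons, e2]
      push_cast
      ring
    · have hc0 : res.count j = 0 := List.count_eq_zero.mpr hmem
      have hstep : solutionStep (res, cnt) j = (res ++ [j], cnt) := by
        unfold solutionStep
        simp [List.contains_eq_mem, hmem]
      rw [hstep, ih (res ++ [j]) cnt ?hb]
      case hb =>
        intro x
        have hx := hres x
        rcases eq_or_ne x j with rfl | hne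
        · simp [List.count_append, hc0]
        · simp [List.count_append, Ne.symm hne]
          omega
      have e1 : (↑(res ++ [j]) : Multiset Int) + ↑t = (↑res : Multiset Int) + ↑(j :: t) := by
        rw [Multiset.coe_add, Multiset.coe_add, List.append_assoc]
        rfl
      have e2 : pairsOf (↑(res ++ [j])) = pairsOf (↑res) := by
        have : (↑(res ++ [j]) : Multiset Int) = j ::ₘ ↑res := by
          exact Quot.sound (List.perm_append_singleton j res)
        rw [this]
        exact pairsOf_cons_of_even _ _ (by simp [hc0])
      rw [e1, e2]

-- the nested fold over boxes is the fold over the flattened item list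
theorem foldl_foldl_flatten (boxes : List (List Int)) (st : List Int × Int) :
    boxes.foldl (fun st i => i.foldl solutionStep st) st
      = (boxes.flatMap (fun box => box)).foldl solutionStep st := by
  induction boxes generalizing st with
  | nil => simp
  | cons b bs ih => simp [List.foldl_append, ih]

-- B's pair sum equals pairsOf of the flattened multiset
theorem alt_pairs_eq (flat : List Int) :
    (((PySem.Dict.counter flat).values).map (fun v => PySem.Int.floordiv v 2)).sum
      = (pairsOf (↑flat) : Int) := by
  have hvals : (PySem.Dict.counter flat).values
      = (PySem.Set.ofList flat).map (fun k => (flat.count k : Int)) := by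
    have := PySem.Dict.items_counter (xs := flat)
    simp only [PySem.Dict.values, this, List.map_map]
    rfl
  rw [hvals, List.map_map]
  have hmap : ((fun v => PySem.Int.floordiv v 2) ∘ fun k => ((flat.count k : Int)))
      = fun k => ((flat.count k / 2 : ℕ) : Int) := by
    funext k
    exact_mod_cast PySem.Int.floordiv_natCast (flat.count k) 2
  rw [hmap]
  have hnd : (PySem.Set.ofList flat).Nodup := PySem.Set.nodup_ofList flat
  have htf : (PySem.Set.ofList flat).toFinset = flat.toFinset := by
    apply Finset.ext
    intro x
    simp [List.mem_toFinset, PySem.Set.mem_ofList]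
  have := List.sum_toFinset (l := PySem.Set.ofList flat)
      (f := fun k => ((flat.count k / 2 : ℕ) : Int)) hnd
  rw [← this, htf]
  unfold pairsOf
  push_cast
  refine Finset.sum_congr rfl ?_
  intro x _
  simp

-- ===== VERDICT (by name: the statement is the Claim_ definition above) =====
theorem solution_spec : Claim_equal_solution := by
  intro boxes _
  unfold Spec_solution solution solution_alt
  simp only []
  rw [foldl_foldl_flatten, loop_count _ [] 0 (by simp)]
  rw [alt_pairs_eq]
  simp [pairsOf]
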